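-- pv_equiv track=rewrite | github.com/pypi-data/pypi-mirror-400 | packages/frontmatter-utils/frontmatter_utils-0.24.0.tar.gz/frontmatter_utils-0.24.0/fmu/specs.py | _parse_list_size_triplets_from_array
-- ===== SOURCE A (Python) =====
-- from typing import Dict, Any, List, Tuple
--
-- def _parse_list_size_triplets_from_array(array: List[str]) -> List[Tuple[str, str, str]]:
--     """Parse list-size field-min-max triplets from array format."""
--     if not array:
--         return None
--
--     result = []
--     # Process triplets: [field, min, max, field, min, max, ...]
--     for i in range(0, len(array), 3):
--         if i + 2 < len(array):
--             result.append((array[i], array[i + 1], array[i + 2]))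
--     return result if result else None
-- ===== SOURCE B (Python) =====
-- def _parse_list_size_triplets_from_array(array):
--     """Parse list-size field-min-max triplets from array format."""
--     if not array:
--         return None
--     it = iter(array)
--     result = list(zip(it, it, it))
--     return result if result else None
-- ===== Notes on version B (the rewrite author's own statement) =====
-- stated objective: idiomatic
-- what changed: Replaces the stride-3 index loop with guard arithmetic by a single iterator consumed three-at-a-time via zip, which drops incomplete trailing triplets by construction.
import Mathlib
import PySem

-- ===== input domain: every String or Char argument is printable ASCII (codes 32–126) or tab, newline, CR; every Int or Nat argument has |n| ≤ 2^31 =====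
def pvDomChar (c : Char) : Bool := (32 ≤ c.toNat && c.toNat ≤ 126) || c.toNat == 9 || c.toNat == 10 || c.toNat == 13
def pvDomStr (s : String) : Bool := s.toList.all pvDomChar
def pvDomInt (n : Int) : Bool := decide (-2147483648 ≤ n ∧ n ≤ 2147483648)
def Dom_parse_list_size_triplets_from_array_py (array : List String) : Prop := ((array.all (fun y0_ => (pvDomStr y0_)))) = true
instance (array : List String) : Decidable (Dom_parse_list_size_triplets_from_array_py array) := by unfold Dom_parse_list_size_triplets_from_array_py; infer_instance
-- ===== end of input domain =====

-- B replaces A's stride-3 index loop (with an i+2 bound guard) by consuming one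
-- iterator three elements at a time (zip(it,it,it)); same cost, more idiomatic.


-- ===== PORT A =====
def parse_list_size_triplets_from_array_py (array : List String) : Option (List (String × String × String)) :=
  if array = [] then none
  else
    let n : Int := PySem.List.len array
    let result : List (String × String × String) :=
      (PySem.List.pyRange 0 n 3).foldl
        (fun acc i =>
          if i + 2 < n then
            acc ++ [(PySem.List.pyGetD array i "",
                     PySem.List.pyGetD array (i + 1) "",
                     PySem.List.pyGetD array (i + 2) "")]
          else acc) []
    if result = [] then none else some result

-- ===== PORT B =====
-- zip(it, it, it) on a single iterator groups consecutive elements in threes,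
-- dropping the incomplete tail: exactly this structural recursion.
def pvChunk3 : List String → List (String × String × String)
  | a :: b :: c :: rest => (a, b, c) :: pvChunk3 rest
  | _ => []

def parse_list_size_triplets_from_array_py_alt (array : List String) : Option (List (String × String × String)) :=
  if array = [] then none
  else
    let result := pvChunk3 array
    if result = [] then none else some result

-- ===== PRECONDITION & SPEC =====
def Spec_parse_list_size_triplets_from_array_py (array : List String) (out : Option (List (String × String × String))) : Prop := out = parse_list_size_triplets_from_array_py_alt array
instance (array : List String) (out : Option (List (String × String × String))) : Decidable (Spec_parse_list_size_triplets_from_array_py array out) := by unfold Spec_parse_list_size_triplets_from_array_py; infer_instance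

-- ===== CLAIM (what is proved, stated in full; the proofs are below) =====
def Claim_equal_parse_list_size_triplets_from_array_py : Prop := ∀ (array : List String), Dom_parse_list_size_triplets_from_array_py array → Spec_parse_list_size_triplets_from_array_py array (parse_list_size_triplets_from_array_py array)

-- ===== LEMMAS AND PROOFS =====

lemma pyRange3_cons {a b : Int} (h : a < b) :
    PySem.List.pyRange a b 3 = a :: PySem.List.pyRange (a + 3) b 3 := by
  rw [PySem.List.pyRange_of_pos a b (by norm_num),
      PySem.List.pyRange_of_pos (a + 3) b (by norm_num)]
  have hc : (if a < b then ((b - a + 3 - 1) / 3).toNat else 0)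
      = (if a + 3 < b then ((b - (a + 3) + 3 - 1) / 3).toNat else 0) + 1 := by
    split_ifs <;> omega
  rw [hc, List.range_succ_eq_map, List.map_cons, List.map_map]
  have hf : ((fun k : Nat => a + 3 * (k : Int)) ∘ Nat.succ)
      = (fun k : Nat => a + 3 + 3 * (k : Int)) := by
    funext k
    simp only [Function.comp_apply, Nat.succ_eq_add_one]
    push_cast; ring
  rw [hf]
  norm_num

lemma pyRange3_nil {a b : Int} (h : b ≤ a) : PySem.List.pyRange a b 3 = [] := by
  rw [PySem.List.pyRange_of_pos a b (by norm_num)]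
  simp [not_lt.mpr h]

lemma loop_eq_chunk3 (arr : List String) :
    ∀ (xs : List String) (i : Nat) (acc : List (String × String × String)),
      arr.drop i = xs →
      (PySem.List.pyRange (i : Int) (PySem.List.len arr) 3).foldl
        (fun acc j =>
          if j + 2 < PySem.List.len arr then
            acc ++ [(PySem.List.pyGetD arr j "",
                     PySem.List.pyGetD arr (j + 1) "",
                     PySem.List.pyGetD arr (j + 2) "")]
          else acc) acc = acc ++ pvChunk3 xs := by
  intro xs
  induction xs using pvChunk3.induct with
  | case1 a b c rest ih =>
    intro i acc hdrop
    have hlen : i + 3 ≤ arr.length := by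
      have := congrArg List.length hdrop
      simp at this; omega
    rw [pyRange3_cons (by change (i : Int) < ((arr.length : Nat) : Int); omega)]
    simp only [List.foldl_cons]
    rw [if_pos (by change (i : Int) + 2 < ((arr.length : Nat) : Int); omega :
          (i : Int) + 2 < PySem.List.len arr)]
    have ha : arr[i]'(by omega) = a := by
      have h0 : arr[i]? = some a := by
        rw [← List.head?_drop, hdrop]; rfl
      rw [List.getElem?_eq_getElem (by omega)] at h0
      exact Option.some.inj h0
    have hb : arr[i + 1]'(by omega) = b := by
      have h0 : arr[i + 1]? = some b := by
        rw [← List.head?_drop, ← List.drop_drop, hdrop]; rfl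
      rw [List.getElem?_eq_getElem (by omega)] at h0
      exact Option.some.inj h0
    have hcc : arr[i + 2]'(by omega) = c := by
      have h0 : arr[i + 2]? = some c := by
        rw [← List.head?_drop, ← List.drop_drop, hdrop]; rfl
      rw [List.getElem?_eq_getElem (by omega)] at h0
      exact Option.some.inj h0
    have e0 : PySem.List.pyGetD arr (i : Int) "" = a := by
      rw [PySem.List.pyGetD_eq_getElem arr "" (by positivity) (by exact_mod_cast show i < arr.length by omega)]
      simpa using ha
    have e1 : PySem.List.pyGetD arr ((i : Int) + 1) "" = b := by
      rw [show (i : Int) + 1 = ((i + 1 : Nat) : Int) by push_cast; ring,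
          PySem.List.pyGetD_eq_getElem arr "" (by positivity) (by exact_mod_cast show i + 1 < arr.length by omega)]
      simpa using hb
    have e2 : PySem.List.pyGetD arr ((i : Int) + 2) "" = c := by
      rw [show (i : Int) + 2 = ((i + 2 : Nat) : Int) by push_cast; ring,
          PySem.List.pyGetD_eq_getElem arr "" (by positivity) (by exact_mod_cast show i + 2 < arr.length by omega)]
      simpa using hcc
    rw [e0, e1, e2]
    have hdrop3 : arr.drop (i + 3) = rest := by
      rw [← List.drop_drop, hdrop]; rfl
    rw [show (i : Int) + 3 = ((i + 3 : Nat) : Int) by push_cast; ring,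
        ih (i + 3) _ hdrop3]
    simp [pvChunk3]
  | case2 xs hne =>
    intro i acc hdrop
    have hshort : xs.length ≤ 2 := by
      rcases xs with _ | ⟨a, _ | ⟨b, _ | ⟨c, rest⟩⟩⟩
      · simp
      · simp
      · simp
      · exact absurd rfl (hne a b c rest)
    have hlen : arr.length ≤ i + 2 := by
      have := congrArg List.length hdrop
      simp at this; omega
    have hchunk : pvChunk3 xs = [] := by
      rcases xs with _ | ⟨a, _ | ⟨b, _ | ⟨c, rest⟩⟩⟩
      · rfl
      · rfl
      · rfl
      · exact absurd rfl (hne a b c rest)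
    rw [hchunk, List.append_nil]
    by_cases hi : i < arr.length
    · rw [pyRange3_cons (by change (i : Int) < ((arr.length : Nat) : Int); omega)]
      simp only [List.foldl_cons]
      rw [if_neg (by change ¬ (i : Int) + 2 < ((arr.length : Nat) : Int); omega :
            ¬ (i : Int) + 2 < PySem.List.len arr),
          pyRange3_nil (by change ((arr.length : Nat) : Int) ≤ (i : Int) + 3; omega :
            PySem.List.len arr ≤ (i : Int) + 3)]
      rfl
    · rw [pyRange3_nil (by change ((arr.length : Nat) : Int) ≤ (i : Int); omega :
            PySem.List.len arr ≤ (i : Int))]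
      rfl

-- ===== VERDICT (by name: the statement is the Claim_ definition above) =====
theorem parse_list_size_triplets_from_array_py_spec : Claim_equal_parse_list_size_triplets_from_array_py := by
  intro array _
  unfold Spec_parse_list_size_triplets_from_array_py
  by_cases h : array = []
  · simp [parse_list_size_triplets_from_array_py, parse_list_size_triplets_from_array_py_alt, h]
  · have hmain := loop_eq_chunk3 array array 0 [] (by simp)
    simp only [List.nil_append] at hmain
    simp only [parse_list_size_triplets_from_array_py, parse_list_size_triplets_from_array_py_alt,
      if_neg h]
    rw [show (0:Int) = ((0:Nat):Int) from rfl, hmain]
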